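-- pv_equiv track=rewrite | github.com/proshian/neuroswipe | src/feature_extractors.py | update_out_of_bounds_with_noise
-- ===== SOURCE A (Python) =====
-- from typing import Tuple, Dict, Optional, Iterable, List, Callable, Union, Set
--
-- def update_out_of_bounds_with_noise(
--     noise_min, noise_max,
--     gname_to_out_of_bounds, gridname_to_wh: dict,
--     )-> Dict[str, Set[Tuple[int, int]]]:
--
--     assert noise_min <= 0
--     assert noise_max >= 0
--
--     additional_out_of_bounds = {gname: set() for gname in gridname_to_wh.keys()}
--
--     for gname in gname_to_out_of_bounds.keys():
--         w, h = gridname_to_wh[gname]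
--
--         for x, y in gname_to_out_of_bounds[gname]:
--             for i in range(noise_min, noise_max+1):
--                 for j in range(noise_min, noise_max+1):
--                     if x+i < 0 or x+i >= w or y+j < 0 or y+j >=h:
--                         additional_out_of_bounds[gname].add((x+i, y+j))
--
--         for x in range(noise_min, w+noise_max+1):
--             for y in range(noise_min, 0):
--                 additional_out_of_bounds[gname].add((x, y))
--
--         for x in range(noise_min, w+noise_max+1):
--             for y in range(h+1, h+noise_max+1):
--                 additional_out_of_bounds[gname].add((x, y))
--
--         for x in range(w, w+noise_max+1):
--             for y in range(0, h+1):
--                 additional_out_of_bounds[gname].add((x, y))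
--
--         for x in range(noise_min, 0):
--             for y in range(0, h+1):
--                 additional_out_of_bounds[gname].add((x, y))
--
--         gname_to_out_of_bounds[gname].update(additional_out_of_bounds[gname])
--
--     return gname_to_out_of_bounds
-- ===== SOURCE B (Python) =====
-- # B: different algorithm for the noise pass: instead of testing every (i,j) offset
-- # pair, it computes for each point and each x-offset the out-of-bounds y-offset
-- # ranges directly by interval clipping (j < -y and j >= h-y clipped to the noise
-- # window), so no per-candidate bounds test is made; the intermediate
-- # additional_out_of_bounds dict is dropped and each grid's additions (noise list
-- # plus the four boundary rectangles built by a product helper) are merged into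
-- # the grid's set with one update.  Like A it mutates gname_to_out_of_bounds's
-- # sets in place and returns it.
--
-- def _rect(xs, ys):
--     return [(x, y) for x in xs for y in ys]
--
--
-- def _noise_out_of_bounds(pts, noise_min, noise_max, w, h):
--     out = []
--     for x, y in pts:
--         for i in range(noise_min, noise_max + 1):
--             xi = x + i
--             if 0 <= xi < w and h > 0:
--                 # inside horizontally: only y-offsets outside [0, h) qualify;
--                 # the two clipped ranges are disjoint and ascending.
--                 for j in range(noise_min, min(noise_max, -y - 1) + 1):
--                     out.append((xi, y + j))
--                 for j in range(max(noise_min, h - y), noise_max + 1):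
--                     out.append((xi, y + j))
--             else:
--                 # outside horizontally (or no valid row exists): every offset
--                 # in the window is out of bounds.
--                 for j in range(noise_min, noise_max + 1):
--                     out.append((xi, y + j))
--     return out
--
--
-- def update_out_of_bounds_with_noise(noise_min, noise_max,
--                                     gname_to_out_of_bounds, gridname_to_wh):
--     assert noise_min <= 0
--     assert noise_max >= 0
--     for gname, pts in gname_to_out_of_bounds.items():
--         w, h = gridname_to_wh[gname]
--         additions = _noise_out_of_bounds(pts, noise_min, noise_max, w, h)
--         additions += _rect(range(noise_min, w + noise_max + 1), range(noise_min, 0))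
--         additions += _rect(range(noise_min, w + noise_max + 1), range(h + 1, h + noise_max + 1))
--         additions += _rect(range(w, w + noise_max + 1), range(0, h + 1))
--         additions += _rect(range(noise_min, 0), range(0, h + 1))
--         pts.update(additions)
--     return gname_to_out_of_bounds
-- ===== Notes on version B (the rewrite author's own statement) =====
-- stated objective: alternative
-- what changed: B's noise pass no longer tests every (i,j) offset pair against the bounds: for each point and x-offset it computes the out-of-bounds y-offset ranges directly by interval clipping (j < -y and j >= h-y clipped into the noise window) and emits only those; the intermediate additional_out_of_bounds dict is dropped and the additions (noise list plus four boundary rectangles from a product helper) are merged into each grid's set with one update.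
-- outside the precondition, e.g. on update_out_of_bounds_with_noise(0, 0, {'a': set()}, {}): A raises KeyError, B raises KeyError; on update_out_of_bounds_with_noise(1, 0, {}, {}): A raises AssertionError, B raises AssertionError
import Mathlib
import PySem

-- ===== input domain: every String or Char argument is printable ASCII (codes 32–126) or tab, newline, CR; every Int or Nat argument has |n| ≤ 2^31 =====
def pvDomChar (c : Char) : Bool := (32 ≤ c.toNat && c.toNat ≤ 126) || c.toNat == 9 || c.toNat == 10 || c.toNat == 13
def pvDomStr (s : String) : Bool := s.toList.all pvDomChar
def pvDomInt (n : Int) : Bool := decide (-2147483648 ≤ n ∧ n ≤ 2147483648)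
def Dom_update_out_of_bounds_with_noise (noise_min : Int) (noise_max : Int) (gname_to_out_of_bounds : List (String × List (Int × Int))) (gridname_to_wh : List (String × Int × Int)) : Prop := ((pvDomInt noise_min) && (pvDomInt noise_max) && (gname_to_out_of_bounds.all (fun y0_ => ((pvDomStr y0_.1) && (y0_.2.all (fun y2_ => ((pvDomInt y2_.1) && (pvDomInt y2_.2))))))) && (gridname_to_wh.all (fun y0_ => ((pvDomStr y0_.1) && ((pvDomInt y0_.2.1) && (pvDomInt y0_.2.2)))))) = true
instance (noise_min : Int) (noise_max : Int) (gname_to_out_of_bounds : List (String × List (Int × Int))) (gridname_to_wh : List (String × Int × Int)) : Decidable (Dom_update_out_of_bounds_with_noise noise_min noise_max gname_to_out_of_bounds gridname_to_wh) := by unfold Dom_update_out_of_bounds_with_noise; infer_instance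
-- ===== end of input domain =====

-- B replaces A's per-candidate bounds test in the noise pass by interval clipping (only the
-- out-of-bounds y-offset ranges are enumerated) and drops the additional_out_of_bounds dict,
-- merging each grid's additions with one set update (objective: alternative). Both A and B
-- mutate the sets of gname_to_out_of_bounds in place and return it; the theorems are about
-- the return value (under the List-of-pairs model the mutation is the return value).

-- ===== PORT A =====
-- one iteration of A's 'for gname in gname_to_out_of_bounds.keys()' loop; the state is
-- (gname_to_out_of_bounds, additional_out_of_bounds)
def pvStepA (noise_min noise_max : Int) (gwd : PySem.Dict String (Int × Int))
    (st : PySem.Dict String (List (Int × Int)) × PySem.Dict String (List (Int × Int)))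
    (gname : String) :
    PySem.Dict String (List (Int × Int)) × PySem.Dict String (List (Int × Int)) :=
  -- w, h = gridname_to_wh[gname]  (KeyError when absent — those inputs are excluded by
  -- Pre_, so the (0, 0) default of the total getD is never the value used)
  let wh := PySem.Dict.getD gwd gname (0, 0)
  let w := wh.1
  let h := wh.2
  -- for x, y in gname_to_out_of_bounds[gname]: …   (additional_out_of_bounds[gname].add(…)
  -- is Dict.modify at key gname; under Pre_ the key is present so the [] default never fires)
  let pts := PySem.Dict.getD st.1 gname []
  let ad1 := pts.foldl (fun ad p =>
      (PySem.List.pyRange noise_min (noise_max + 1) 1).foldl (fun ad i =>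
        (PySem.List.pyRange noise_min (noise_max + 1) 1).foldl (fun ad j =>
          if p.1 + i < 0 ∨ p.1 + i ≥ w ∨ p.2 + j < 0 ∨ p.2 + j ≥ h then
            PySem.Dict.modify ad gname [] (fun s => PySem.Set.add s (p.1 + i, p.2 + j))
          else ad) ad) ad) st.2
  let ad2 := (PySem.List.pyRange noise_min (w + noise_max + 1) 1).foldl (fun ad x =>
      (PySem.List.pyRange noise_min 0 1).foldl (fun ad y =>
        PySem.Dict.modify ad gname [] (fun s => PySem.Set.add s (x, y))) ad) ad1
  let ad3 := (PySem.List.pyRange noise_min (w + noise_max + 1) 1).foldl (fun ad x =>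
      (PySem.List.pyRange (h + 1) (h + noise_max + 1) 1).foldl (fun ad y =>
        PySem.Dict.modify ad gname [] (fun s => PySem.Set.add s (x, y))) ad) ad2
  let ad4 := (PySem.List.pyRange w (w + noise_max + 1) 1).foldl (fun ad x =>
      (PySem.List.pyRange 0 (h + 1) 1).foldl (fun ad y =>
        PySem.Dict.modify ad gname [] (fun s => PySem.Set.add s (x, y))) ad) ad3
  let ad5 := (PySem.List.pyRange noise_min 0 1).foldl (fun ad x =>
      (PySem.List.pyRange 0 (h + 1) 1).foldl (fun ad y =>
        PySem.Dict.modify ad gname [] (fun s => PySem.Set.add s (x, y))) ad) ad4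
  -- gname_to_out_of_bounds[gname].update(additional_out_of_bounds[gname])
  (st.1.insert gname (PySem.Set.update pts (PySem.Dict.getD ad5 gname [])), ad5)

-- the asserts 'noise_min <= 0', 'noise_max >= 0' raise AssertionError when violated —
-- those inputs are excluded by Pre_ (outside Pre_ nothing is claimed)
def update_out_of_bounds_with_noise (noise_min : Int) (noise_max : Int) (gname_to_out_of_bounds : List (String × List (Int × Int))) (gridname_to_wh : List (String × Int × Int)) : List (String × List (Int × Int)) :=
  let gd : PySem.Dict String (List (Int × Int)) := ⟨gname_to_out_of_bounds⟩
  let gwd : PySem.Dict String (Int × Int) := ⟨gridname_to_wh⟩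
  -- additional_out_of_bounds = {gname: set() for gname in gridname_to_wh.keys()}
  let additional : PySem.Dict String (List (Int × Int)) :=
    gwd.keys.foldl (fun d k => d.insert k []) ⟨[]⟩
  (gd.keys.foldl (pvStepA noise_min noise_max gwd) (gd, additional)).1.items

-- ===== PORT B =====
-- _rect(xs, ys): the product rectangle, a comprehension
def pvRect (xs ys : List Int) : List (Int × Int) :=
  xs.flatMap (fun x => ys.map (fun y => (x, y)))

-- _noise_out_of_bounds: per point and x-offset, the out-of-bounds y-offsets are
-- enumerated directly as two clipped ranges (no per-candidate bounds test)
def pvNoiseOut (pts : List (Int × Int)) (noise_min noise_max w h : Int) : List (Int × Int) :=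
  pts.flatMap (fun p =>
    (PySem.List.pyRange noise_min (noise_max + 1) 1).flatMap (fun i =>
      if 0 ≤ p.1 + i ∧ p.1 + i < w ∧ 0 < h then
        (PySem.List.pyRange noise_min (min noise_max (-p.2 - 1) + 1) 1).map
          (fun j => (p.1 + i, p.2 + j)) ++
        (PySem.List.pyRange (max noise_min (h - p.2)) (noise_max + 1) 1).map
          (fun j => (p.1 + i, p.2 + j))
      else
        (PySem.List.pyRange noise_min (noise_max + 1) 1).map (fun j => (p.1 + i, p.2 + j))))

def update_out_of_bounds_with_noise_alt (noise_min : Int) (noise_max : Int) (gname_to_out_of_bounds : List (String × List (Int × Int))) (gridname_to_wh : List (String × Int × Int)) : List (String × List (Int × Int)) :=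
  gname_to_out_of_bounds.map (fun e =>
    let wh := PySem.Dict.getD ⟨gridname_to_wh⟩ e.1 (0, 0)
    let w := wh.1
    let h := wh.2
    (e.1, PySem.Set.update e.2
      (pvNoiseOut e.2 noise_min noise_max w h ++
       pvRect (PySem.List.pyRange noise_min (w + noise_max + 1) 1) (PySem.List.pyRange noise_min 0 1) ++
       pvRect (PySem.List.pyRange noise_min (w + noise_max + 1) 1) (PySem.List.pyRange (h + 1) (h + noise_max + 1) 1) ++
       pvRect (PySem.List.pyRange w (w + noise_max + 1) 1) (PySem.List.pyRange 0 (h + 1) 1) ++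
       pvRect (PySem.List.pyRange noise_min 0 1) (PySem.List.pyRange 0 (h + 1) 1))))

-- ===== PRECONDITION & SPEC =====
-- Pre_ excludes exactly: inputs where A raises (AssertionError when noise_min > 0 or
-- noise_max < 0; KeyError when a grid name of gname_to_out_of_bounds has no entry in
-- gridname_to_wh) and association lists whose gname_to_out_of_bounds keys are duplicated,
-- which do not correspond to any Python dict (a Python dict collapses them).
def Pre_update_out_of_bounds_with_noise (noise_min : Int) (noise_max : Int) (gname_to_out_of_bounds : List (String × List (Int × Int))) (gridname_to_wh : List (String × Int × Int)) : Prop :=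
  noise_min ≤ 0 ∧ 0 ≤ noise_max ∧ (gname_to_out_of_bounds.map Prod.fst).Nodup ∧
    ∀ e ∈ gname_to_out_of_bounds, e.1 ∈ gridname_to_wh.map Prod.fst
instance (noise_min : Int) (noise_max : Int) (gname_to_out_of_bounds : List (String × List (Int × Int))) (gridname_to_wh : List (String × Int × Int)) : Decidable (Pre_update_out_of_bounds_with_noise noise_min noise_max gname_to_out_of_bounds gridname_to_wh) := by unfold Pre_update_out_of_bounds_with_noise; infer_instance

def pvWitness_update_out_of_bounds_with_noise : Int × Int × (List (String × List (Int × Int))) × (List (String × Int × Int)) :=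
  (-1, 1, [("a", [(0, 0)])], [("a", (2, 2))])

def Spec_update_out_of_bounds_with_noise (noise_min : Int) (noise_max : Int) (gname_to_out_of_bounds : List (String × List (Int × Int))) (gridname_to_wh : List (String × Int × Int)) (out : List (String × List (Int × Int))) : Prop := out = update_out_of_bounds_with_noise_alt noise_min noise_max gname_to_out_of_bounds gridname_to_wh
instance (noise_min : Int) (noise_max : Int) (gname_to_out_of_bounds : List (String × List (Int × Int))) (gridname_to_wh : List (String × Int × Int)) (out : List (String × List (Int × Int))) : Decidable (Spec_update_out_of_bounds_with_noise noise_min noise_max gname_to_out_of_bounds gridname_to_wh out) := by unfold Spec_update_out_of_bounds_with_noise; infer_instance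

-- ===== CLAIM (what is proved, stated in full; the proofs are below) =====
def Claim_equal_update_out_of_bounds_with_noise : Prop := ∀ (noise_min : Int) (noise_max : Int) (gname_to_out_of_bounds : List (String × List (Int × Int))) (gridname_to_wh : List (String × Int × Int)), Dom_update_out_of_bounds_with_noise noise_min noise_max gname_to_out_of_bounds gridname_to_wh → Pre_update_out_of_bounds_with_noise noise_min noise_max gname_to_out_of_bounds gridname_to_wh → Spec_update_out_of_bounds_with_noise noise_min noise_max gname_to_out_of_bounds gridname_to_wh (update_out_of_bounds_with_noise noise_min noise_max gname_to_out_of_bounds gridname_to_wh)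

-- ===== LEMMAS AND PROOFS =====

-- the value B computes for one grid entry (proof-only abbreviation of B's map body)
def pvNewSet (noise_min noise_max : Int) (gwd : PySem.Dict String (Int × Int))
    (k : String) (pts : List (Int × Int)) : List (Int × Int) :=
  let wh := PySem.Dict.getD gwd k (0, 0)
  let w := wh.1
  let h := wh.2
  PySem.Set.update pts
    (pvNoiseOut pts noise_min noise_max w h ++
     pvRect (PySem.List.pyRange noise_min (w + noise_max + 1) 1) (PySem.List.pyRange noise_min 0 1) ++
     pvRect (PySem.List.pyRange noise_min (w + noise_max + 1) 1) (PySem.List.pyRange (h + 1) (h + noise_max + 1) 1) ++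
     pvRect (PySem.List.pyRange w (w + noise_max + 1) 1) (PySem.List.pyRange 0 (h + 1) 1) ++
     pvRect (PySem.List.pyRange noise_min 0 1) (PySem.List.pyRange 0 (h + 1) 1))

-- Set lemmas: updating with a set built by adds = updating with the underlying list
theorem pv_update_add {α : Type} [BEq α] [LawfulBEq α] (s t : List α) (x : α) :
    PySem.Set.update s (PySem.Set.add t x) = PySem.Set.add (PySem.Set.update s t) x := by
  by_cases hm : x ∈ t
  · have h2 : x ∈ PySem.Set.update s t := (PySem.Set.mem_update s t x).mpr (Or.inr hm)
    simp [PySem.Set.add, hm, h2]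
  · by_cases h2 : x ∈ PySem.Set.update s t
    · simp [PySem.Set.add, hm, PySem.Set.update, List.foldl_append]
    · simp [PySem.Set.add, hm, PySem.Set.update, List.foldl_append]

theorem pv_update_foldl_add {α : Type} [BEq α] [LawfulBEq α] (L : List α) :
    ∀ (t s : List α), PySem.Set.update s (L.foldl PySem.Set.add t) =
      PySem.Set.update (PySem.Set.update s t) L := by
  induction L with
  | nil => intro t s; simp [PySem.Set.update]
  | cons x L ih =>
      intro t s
      show PySem.Set.update s (L.foldl PySem.Set.add (PySem.Set.add t x)) = _
      rw [ih, pv_update_add]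
      show _ = List.foldl PySem.Set.add (PySem.Set.add (PySem.Set.update s t) x) L
      rfl

theorem pv_update_foldl_nil {α : Type} [BEq α] [LawfulBEq α] (L s : List α) :
    PySem.Set.update s (L.foldl PySem.Set.add []) = PySem.Set.update s L := by
  rw [pv_update_foldl_add]
  simp [PySem.Set.update]

-- Dict lemmas: reading a fold of modifies at a fixed key
theorem pv_getD_modify_self (d : PySem.Dict String (List (Int × Int))) (k : String)
    (f : List (Int × Int) → List (Int × Int)) :
    (PySem.Dict.modify d k [] f).getD k [] = f (d.getD k []) := by
  simp [PySem.Dict.modify, PySem.Dict.getD_insert_self]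

theorem pv_getD_modify_ne (d : PySem.Dict String (List (Int × Int))) (k k' : String)
    (hne : k' ≠ k) (f : List (Int × Int) → List (Int × Int)) :
    (PySem.Dict.modify d k [] f).getD k' [] = d.getD k' [] := by
  simp [PySem.Dict.modify, PySem.Dict.getD_insert, hne]

-- a fold over dicts that simulates a fold over the value at key k and preserves other keys
theorem pv_foldl_sim {α : Type} (l : List α)
    (stepd : PySem.Dict String (List (Int × Int)) → α → PySem.Dict String (List (Int × Int)))
    (steps : List (Int × Int) → α → List (Int × Int)) (k : String)
    (h1 : ∀ d x, (stepd d x).getD k [] = steps (d.getD k []) x)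
    (h2 : ∀ d x k', k' ≠ k → (stepd d x).getD k' [] = d.getD k' []) :
    ∀ d, (l.foldl stepd d).getD k [] = l.foldl steps (d.getD k []) ∧
      ∀ k', k' ≠ k → (l.foldl stepd d).getD k' [] = d.getD k' [] := by
  induction l with
  | nil => intro d; exact ⟨rfl, fun _ _ => rfl⟩
  | cons x l ih =>
      intro d
      have hx := ih (stepd d x)
      refine ⟨?_, ?_⟩
      · show (l.foldl stepd (stepd d x)).getD k [] = l.foldl steps (steps (d.getD k []) x)
        rw [hx.1, h1]
      · intro k' hne
        show (l.foldl stepd (stepd d x)).getD k' [] = d.getD k' []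
        rw [hx.2 k' hne, h2 d x k' hne]

-- the j / (i,j) / noise loops of A, seen through the value at key gname
theorem pv_sim_j (noise_min noise_max w h : Int) (k : String) (p : Int × Int) (i : Int) :
    ∀ d, (((PySem.List.pyRange noise_min (noise_max + 1) 1).foldl (fun ad j =>
        if p.1 + i < 0 ∨ p.1 + i ≥ w ∨ p.2 + j < 0 ∨ p.2 + j ≥ h then
          PySem.Dict.modify ad k [] (fun s => PySem.Set.add s (p.1 + i, p.2 + j))
        else ad) d).getD k [] =
      (PySem.List.pyRange noise_min (noise_max + 1) 1).foldl (fun s j =>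
        if p.1 + i < 0 ∨ p.1 + i ≥ w ∨ p.2 + j < 0 ∨ p.2 + j ≥ h then
          PySem.Set.add s (p.1 + i, p.2 + j)
        else s) (d.getD k [])) ∧
      ∀ k', k' ≠ k → (((PySem.List.pyRange noise_min (noise_max + 1) 1).foldl (fun ad j =>
        if p.1 + i < 0 ∨ p.1 + i ≥ w ∨ p.2 + j < 0 ∨ p.2 + j ≥ h then
          PySem.Dict.modify ad k [] (fun s => PySem.Set.add s (p.1 + i, p.2 + j))
        else ad) d).getD k' [] = d.getD k' []) := by
  refine pv_foldl_sim _ _ _ k ?_ ?_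
  · intro d j
    split
    · exact pv_getD_modify_self d k _
    · rfl
  · intro d j k' hne
    split
    · exact pv_getD_modify_ne d k k' hne _
    · rfl

theorem pv_sim_i (noise_min noise_max w h : Int) (k : String) (p : Int × Int) :
    ∀ d, (((PySem.List.pyRange noise_min (noise_max + 1) 1).foldl (fun ad i =>
        (PySem.List.pyRange noise_min (noise_max + 1) 1).foldl (fun ad j =>
          if p.1 + i < 0 ∨ p.1 + i ≥ w ∨ p.2 + j < 0 ∨ p.2 + j ≥ h then
            PySem.Dict.modify ad k [] (fun s => PySem.Set.add s (p.1 + i, p.2 + j))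
          else ad) ad) d).getD k [] =
      (PySem.List.pyRange noise_min (noise_max + 1) 1).foldl (fun s i =>
        (PySem.List.pyRange noise_min (noise_max + 1) 1).foldl (fun s j =>
          if p.1 + i < 0 ∨ p.1 + i ≥ w ∨ p.2 + j < 0 ∨ p.2 + j ≥ h then
            PySem.Set.add s (p.1 + i, p.2 + j)
          else s) s) (d.getD k [])) ∧
      ∀ k', k' ≠ k → (((PySem.List.pyRange noise_min (noise_max + 1) 1).foldl (fun ad i =>
        (PySem.List.pyRange noise_min (noise_max + 1) 1).foldl (fun ad j =>
          if p.1 + i < 0 ∨ p.1 + i ≥ w ∨ p.2 + j < 0 ∨ p.2 + j ≥ h then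
            PySem.Dict.modify ad k [] (fun s => PySem.Set.add s (p.1 + i, p.2 + j))
          else ad) ad) d).getD k' [] = d.getD k' []) := by
  refine pv_foldl_sim _ _ _ k ?_ ?_
  · intro d i
    exact (pv_sim_j noise_min noise_max w h k p i d).1
  · intro d i k' hne
    exact (pv_sim_j noise_min noise_max w h k p i d).2 k' hne

theorem pv_sim_noise (noise_min noise_max w h : Int) (k : String) (pts : List (Int × Int)) :
    ∀ d, ((pts.foldl (fun ad p =>
        (PySem.List.pyRange noise_min (noise_max + 1) 1).foldl (fun ad i =>
          (PySem.List.pyRange noise_min (noise_max + 1) 1).foldl (fun ad j =>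
            if p.1 + i < 0 ∨ p.1 + i ≥ w ∨ p.2 + j < 0 ∨ p.2 + j ≥ h then
              PySem.Dict.modify ad k [] (fun s => PySem.Set.add s (p.1 + i, p.2 + j))
            else ad) ad) ad) d).getD k [] =
      pts.foldl (fun s p =>
        (PySem.List.pyRange noise_min (noise_max + 1) 1).foldl (fun s i =>
          (PySem.List.pyRange noise_min (noise_max + 1) 1).foldl (fun s j =>
            if p.1 + i < 0 ∨ p.1 + i ≥ w ∨ p.2 + j < 0 ∨ p.2 + j ≥ h then
              PySem.Set.add s (p.1 + i, p.2 + j)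
            else s) s) s) (d.getD k [])) ∧
      ∀ k', k' ≠ k → ((pts.foldl (fun ad p =>
        (PySem.List.pyRange noise_min (noise_max + 1) 1).foldl (fun ad i =>
          (PySem.List.pyRange noise_min (noise_max + 1) 1).foldl (fun ad j =>
            if p.1 + i < 0 ∨ p.1 + i ≥ w ∨ p.2 + j < 0 ∨ p.2 + j ≥ h then
              PySem.Dict.modify ad k [] (fun s => PySem.Set.add s (p.1 + i, p.2 + j))
            else ad) ad) ad) d).getD k' [] = d.getD k' []) := by
  refine pv_foldl_sim _ _ _ k ?_ ?_
  · intro d p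
    exact (pv_sim_i noise_min noise_max w h k p d).1
  · intro d p k' hne
    exact (pv_sim_i noise_min noise_max w h k p d).2 k' hne

-- a band double loop of A, seen through the value at key gname
theorem pv_sim_band_inner (ys : List Int) (k : String) (x : Int) :
    ∀ d, ((ys.foldl (fun ad y =>
        PySem.Dict.modify ad k [] (fun s => PySem.Set.add s (x, y))) d).getD k [] =
      ys.foldl (fun s y => PySem.Set.add s (x, y)) (d.getD k [])) ∧
      ∀ k', k' ≠ k → ((ys.foldl (fun ad y =>
        PySem.Dict.modify ad k [] (fun s => PySem.Set.add s (x, y))) d).getD k' [] =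
        d.getD k' []) := by
  refine pv_foldl_sim _ _ _ k ?_ ?_
  · intro d y
    exact pv_getD_modify_self d k _
  · intro d y k' hne
    exact pv_getD_modify_ne d k k' hne _

theorem pv_sim_band (xs ys : List Int) (k : String) :
    ∀ d, ((xs.foldl (fun ad x =>
        ys.foldl (fun ad y =>
          PySem.Dict.modify ad k [] (fun s => PySem.Set.add s (x, y))) ad) d).getD k [] =
      xs.foldl (fun s x => ys.foldl (fun s y => PySem.Set.add s (x, y)) s) (d.getD k [])) ∧
      ∀ k', k' ≠ k → ((xs.foldl (fun ad x =>
        ys.foldl (fun ad y =>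
          PySem.Dict.modify ad k [] (fun s => PySem.Set.add s (x, y))) ad) d).getD k' [] =
        d.getD k' []) := by
  refine pv_foldl_sim _ _ _ k ?_ ?_
  · intro d x
    exact (pv_sim_band_inner ys k x d).1
  · intro d x k' hne
    exact (pv_sim_band_inner ys k x d).2 k' hne

-- a conditional-add fold is the add fold over the filtered, mapped list
theorem pv_foldl_if_filter (P : Int → Prop) [DecidablePred P] (f : Int → Int × Int)
    (L : List Int) :
    ∀ s, L.foldl (fun s j => if P j then PySem.Set.add s (f j) else s) s =
      ((L.filter (fun j => decide (P j))).map f).foldl PySem.Set.add s := by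
  induction L with
  | nil => intro s; rfl
  | cons x L ih =>
      intro s
      by_cases hx : P x <;> simp [hx, ih]

-- a two-sided interval condition filters an ascending range into two clipped ranges
theorem pv_filter_split (c d : Int) (hcd : c ≤ d) :
    ∀ (n : Nat) (a b : Int), (b - a).toNat = n →
      (PySem.List.pyRange a b 1).filter (fun j => decide (j < c ∨ d ≤ j)) =
        PySem.List.pyRange a (min b c) 1 ++ PySem.List.pyRange (max a d) b 1 := by
  intro n
  induction n with
  | zero =>
      intro a b hn
      rw [PySem.List.pyRange_one_eq_nil (by omega), PySem.List.pyRange_one_eq_nil (by omega),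
        PySem.List.pyRange_one_eq_nil (by omega)]
      rfl
  | succ n ih =>
      intro a b hn
      have hab : a < b := by omega
      rw [PySem.List.pyRange_one_cons hab]
      by_cases hac : a < c
      · rw [List.filter_cons_of_pos (by simp; omega), ih (a + 1) b (by omega),
          PySem.List.pyRange_one_cons (show a < min b c by omega),
          show max (a + 1) d = max a d by omega]
        rfl
      · by_cases had : d ≤ a
        · rw [List.filter_cons_of_pos (by simp; omega), ih (a + 1) b (by omega),
            PySem.List.pyRange_one_eq_nil (show min b c ≤ a + 1 by omega),
            PySem.List.pyRange_one_eq_nil (show min b c ≤ a by omega),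
            show max (a + 1) d = a + 1 by omega, show max a d = a by omega,
            PySem.List.pyRange_one_cons hab]
          rfl
        · rw [List.filter_cons_of_neg (by simp; omega), ih (a + 1) b (by omega),
            PySem.List.pyRange_one_eq_nil (show min b c ≤ a + 1 by omega),
            PySem.List.pyRange_one_eq_nil (show min b c ≤ a by omega),
            show max (a + 1) d = max a d by omega]

-- B's clipped noise list folds (by adds) exactly as A's set-side triple loop
theorem pv_noise_eq (noise_min noise_max w h : Int) (pts : List (Int × Int)) (s : List (Int × Int)) :
    (pvNoiseOut pts noise_min noise_max w h).foldl PySem.Set.add s =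
      pts.foldl (fun s p =>
        (PySem.List.pyRange noise_min (noise_max + 1) 1).foldl (fun s i =>
          (PySem.List.pyRange noise_min (noise_max + 1) 1).foldl (fun s j =>
            if p.1 + i < 0 ∨ p.1 + i ≥ w ∨ p.2 + j < 0 ∨ p.2 + j ≥ h then
              PySem.Set.add s (p.1 + i, p.2 + j)
            else s) s) s) s := by
  unfold pvNoiseOut
  rw [List.foldl_flatMap]
  refine List.foldl_ext _ _ s ?_
  intro s p _
  rw [List.foldl_flatMap]
  refine List.foldl_ext _ _ s ?_
  intro s i _
  by_cases hC : 0 ≤ p.1 + i ∧ p.1 + i < w ∧ 0 < h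
  · rw [if_pos hC]
    rw [show (fun (s : PySem.Set (Int × Int)) (j : Int) =>
        if p.1 + i < 0 ∨ p.1 + i ≥ w ∨ p.2 + j < 0 ∨ p.2 + j ≥ h then
          PySem.Set.add s (p.1 + i, p.2 + j) else s) =
      (fun (s : PySem.Set (Int × Int)) (j : Int) =>
        if j < -p.2 ∨ h - p.2 ≤ j then PySem.Set.add s (p.1 + i, p.2 + j) else s) from
      funext fun s => funext fun j => if_congr (by omega) rfl rfl]
    rw [pv_foldl_if_filter (fun j => j < -p.2 ∨ h - p.2 ≤ j) (fun j => (p.1 + i, p.2 + j)),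
      pv_filter_split (-p.2) (h - p.2) (by omega) _ noise_min (noise_max + 1) rfl,
      show min (noise_max + 1) (-p.2) = min noise_max (-p.2 - 1) + 1 by omega,
      List.map_append, List.foldl_append]
  · rw [if_neg hC]
    rw [List.foldl_map]
    refine (List.foldl_ext _ _ s ?_).symm
    intro s j _
    rw [if_pos (by omega)]

-- B's rectangle list folds (by adds) exactly as A's set-side band double loop
theorem pv_band_eq (xs ys : List Int) (s : List (Int × Int)) :
    (pvRect xs ys).foldl PySem.Set.add s =
      xs.foldl (fun s x => ys.foldl (fun s y => PySem.Set.add s (x, y)) s) s := by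
  unfold pvRect
  rw [List.foldl_flatMap]
  refine List.foldl_ext _ _ s ?_
  intro s x _
  rw [List.foldl_map]

-- one iteration of A's outer loop computes B's per-entry value …
theorem pv_stepA_fst (noise_min noise_max : Int) (gwd : PySem.Dict String (Int × Int))
    (acc ad : PySem.Dict String (List (Int × Int))) (k : String)
    (had : ad.getD k [] = []) :
    (pvStepA noise_min noise_max gwd (acc, ad) k).1 =
      acc.insert k (pvNewSet noise_min noise_max gwd k (acc.getD k [])) := by
  simp only [pvStepA, pvNewSet]
  rw [(pv_sim_band _ _ _ _).1, (pv_sim_band _ _ _ _).1, (pv_sim_band _ _ _ _).1,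
    (pv_sim_band _ _ _ _).1, (pv_sim_noise _ _ _ _ _ _ _).1, had]
  rw [← pv_noise_eq, ← pv_band_eq, ← pv_band_eq, ← pv_band_eq, ← pv_band_eq]
  rw [← List.foldl_append, ← List.foldl_append, ← List.foldl_append, ← List.foldl_append]
  rw [pv_update_foldl_nil]
  simp [List.append_assoc]

-- … and keeps the other additional_out_of_bounds entries untouched
theorem pv_stepA_snd (noise_min noise_max : Int) (gwd : PySem.Dict String (Int × Int))
    (acc ad : PySem.Dict String (List (Int × Int))) (k k' : String) (hne : k' ≠ k) :
    (pvStepA noise_min noise_max gwd (acc, ad) k).2.getD k' [] = ad.getD k' [] := by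
  simp only [pvStepA]
  rw [(pv_sim_band _ _ _ _).2 k' hne, (pv_sim_band _ _ _ _).2 k' hne,
    (pv_sim_band _ _ _ _).2 k' hne, (pv_sim_band _ _ _ _).2 k' hne,
    (pv_sim_noise _ _ _ _ _ _ _).2 k' hne]

-- initial additional_out_of_bounds: every value read with default [] is []
theorem pv_ad0_getD (l : List String) :
    ∀ (d : PySem.Dict String (List (Int × Int))), (∀ k, d.getD k [] = []) →
      ∀ k, (l.foldl (fun d k => d.insert k ([] : List (Int × Int))) d).getD k [] = [] := by
  induction l with
  | nil => intro d h k; exact h k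
  | cons x l ih =>
      intro d h k
      refine ih _ ?_ k
      intro k'
      rw [PySem.Dict.getD_insert]
      split <;> simp [h]

-- the main fold of A equals a fold of per-entry inserts of B's values
theorem pv_main_fold (noise_min noise_max : Int) (gwd : PySem.Dict String (Int × Int))
    (ks : List String) :
    ∀ (acc ad : PySem.Dict String (List (Int × Int))), ks.Nodup →
      (∀ k ∈ ks, ad.getD k [] = []) →
      (ks.foldl (pvStepA noise_min noise_max gwd) (acc, ad)).1 =
        ks.foldl (fun acc k =>
          acc.insert k (pvNewSet noise_min noise_max gwd k (acc.getD k []))) acc := by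
  induction ks with
  | nil => intro acc ad _ _; rfl
  | cons k ks ih =>
      intro acc ad hnd had
      have hk : ad.getD k [] = [] := had k (List.mem_cons_self ..)
      have hfst := pv_stepA_fst noise_min noise_max gwd acc ad k hk
      show (ks.foldl (pvStepA noise_min noise_max gwd)
        (pvStepA noise_min noise_max gwd (acc, ad) k)).1 = _
      have hpair : pvStepA noise_min noise_max gwd (acc, ad) k =
          ((pvStepA noise_min noise_max gwd (acc, ad) k).1,
           (pvStepA noise_min noise_max gwd (acc, ad) k).2) := rfl
      rw [List.foldl_cons, hpair, hfst]
      refine ih _ _ hnd.of_cons ?_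
      intro k' hk'
      have hne : k' ≠ k := by
        rintro rfl
        exact (List.nodup_cons.mp hnd).1 hk'
      rw [pv_stepA_snd noise_min noise_max gwd acc ad k k' hne]
      exact had k' (List.mem_cons_of_mem _ hk')

-- locating the first entry with a fresh key
theorem pv_find_key (e : String × List (Int × Int)) (u : List (String × List (Int × Int))) :
    ∀ (v : List (String × List (Int × Int))), e.1 ∉ v.map Prod.fst →
      (v ++ e :: u).find? (fun p => p.1 == e.1) = some e := by
  intro v
  induction v with
  | nil =>
      intro _
      simp only [List.nil_append]
      exact List.find?_cons_of_pos (by simp)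
  | cons q v ih =>
      intro hv
      have hq : ¬ (q.1 == e.1) = true := by
        simp only [beq_iff_eq]
        intro h
        exact hv (by simp [List.map_cons, h])
      simp only [List.cons_append]
      rw [List.find?_cons_of_neg (p := fun (p : String × List (Int × Int)) => p.1 == e.1) hq]
      exact ih (fun h => hv (by simp only [List.map_cons, List.mem_cons]; exact Or.inr h))

-- replacing the entry at an absent key is the identity
theorem pv_map_repl_id (k : String) (val : String × List (Int × Int))
    (w : List (String × List (Int × Int))) (hw : k ∉ w.map Prod.fst) :
    w.map (fun p => if (p.1 == k) = true then val else p) = w := by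
  induction w with
  | nil => rfl
  | cons p w ih =>
      have hp : ¬ (p.1 == k) = true := by
        simp only [beq_iff_eq]
        intro h
        exact hw (by simp [List.map_cons, h])
      have hw' : k ∉ w.map Prod.fst :=
        fun h => hw (by simp only [List.map_cons, List.mem_cons]; exact Or.inr h)
      simp only [List.map_cons, if_neg hp]
      rw [ih hw']

-- folding per-key inserts over the keys of the dict itself = mapping over the entries
theorem pv_insert_fold_map (F : String → List (Int × Int) → List (Int × Int))
    (u : List (String × List (Int × Int))) :
    ∀ (v : List (String × List (Int × Int))), ((v ++ u).map Prod.fst).Nodup →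
      ((u.map Prod.fst).foldl (fun acc k =>
          PySem.Dict.insert acc k (F k (acc.getD k []))) ⟨v ++ u⟩).items =
        v ++ u.map (fun e => (e.1, F e.1 e.2)) := by
  induction u with
  | nil => intro v _; rfl
  | cons e u ih =>
      intro v hnd
      have hnotv : e.1 ∉ v.map Prod.fst := by
        have := (List.nodup_append.mp (by simpa using hnd)).2.2
        intro hmem
        exact this e.1 hmem e.1 (by simp) rfl
      have hnotu : e.1 ∉ u.map Prod.fst := by
        have h2 := (List.nodup_append.mp (by simpa using hnd)).2.1
        have := (List.nodup_cons.mp h2).1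
        simpa using this
      have hget : (PySem.Dict.getD (⟨v ++ e :: u⟩ : PySem.Dict String (List (Int × Int))) e.1 []) = e.2 := by
        simp [PySem.Dict.getD, PySem.Dict.get?, pv_find_key e u v hnotv]
      have hcont : (PySem.Dict.contains (⟨v ++ e :: u⟩ : PySem.Dict String (List (Int × Int))) e.1) = true := by
        rw [PySem.Dict.contains_eq_isSome_get?]
        simp [PySem.Dict.get?, pv_find_key e u v hnotv]
      have hins : PySem.Dict.insert (⟨v ++ e :: u⟩ : PySem.Dict String (List (Int × Int))) e.1 (F e.1 e.2) =
          ⟨(v ++ [(e.1, F e.1 e.2)]) ++ u⟩ := by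
        unfold PySem.Dict.insert
        rw [if_pos hcont]
        congr 1
        simp only [List.map_append, List.map_cons]
        rw [pv_map_repl_id e.1 _ v hnotv, pv_map_repl_id e.1 _ u hnotu]
        simp
      show ((u.map Prod.fst).foldl _
        (PySem.Dict.insert ⟨v ++ e :: u⟩ e.1 (F e.1 (PySem.Dict.getD ⟨v ++ e :: u⟩ e.1 [])))).items = _
      rw [hget, hins, ih (v ++ [(e.1, F e.1 e.2)]) (by simpa using hnd)]
      simp

-- ===== VERDICT (by name: the statement is the Claim_ definition above) =====
theorem update_out_of_bounds_with_noise_spec : Claim_equal_update_out_of_bounds_with_noise := by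
  intro noise_min noise_max g gw _ hpre
  obtain ⟨-, -, hnd, hmem⟩ := hpre
  unfold Spec_update_out_of_bounds_with_noise
  show (((g.map Prod.fst).foldl (pvStepA noise_min noise_max ⟨gw⟩)
      (⟨g⟩, (gw.map Prod.fst).foldl (fun d k => PySem.Dict.insert d k []) ⟨[]⟩)).1.items =
    update_out_of_bounds_with_noise_alt noise_min noise_max g gw)
  rw [pv_main_fold noise_min noise_max ⟨gw⟩ _ ⟨g⟩ _ hnd
    (fun k _ => pv_ad0_getD _ _ (fun _ => rfl) k)]
  have hmap := pv_insert_fold_map (pvNewSet noise_min noise_max ⟨gw⟩) g []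
    (by simpa using hnd)
  rw [List.nil_append] at hmap
  rw [hmap, List.nil_append]
  unfold update_out_of_bounds_with_noise_alt pvNewSet
  rfl
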